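-- pv_equiv track=rewrite | github.com/weizongzheng/customers_Acquisition | build/lib/CustomerAc/Recom_package/基于关联规则的推荐算法/Apriori_update.py | num_count
-- ===== SOURCE A (Python) =====
-- def num_count(dataSet, data):
--     data_list = dict()
--     for user, goods in dataSet.items():
--         goods = list(goods)
--         for i in data:
--             if set(list(i)).issubset(list(goods)):
--                 keys = "、".join(list(i))
--                 data_list.setdefault(keys, 0)
--                 data_list[keys] += 1
--     return data_list
-- ===== SOURCE B (Python) =====
-- def num_count(dataSet, data):
--     # Inverted index: item -> list of user positions owning it (ascending).
--     goods_lists = list(dataSet.values())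
--     n = len(goods_lists)
--     index = {}
--     for pos, goods in enumerate(goods_lists):
--         for g in goods:
--             index.setdefault(g, []).append(pos)
--     keys = ["、".join(list(i)) for i in data]
--     # For each itemset, the users owning all its items; collect (user, itemset) events.
--     events = []
--     for j, itemset in enumerate(data):
--         matched = list(range(n))
--         for g in itemset:
--             owners = set(index.get(g, []))
--             matched = [u for u in matched if u in owners]
--         for u in matched:
--             events.append((u, j))
--     # User-major order reproduces the dict's insertion order.
--     events.sort()
--     result = {}
--     for u, j in events:
--         k = keys[j]
--         result[k] = result.get(k, 0) + 1
--     return result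
-- ===== Notes on version B (the rewrite author's own statement) =====
-- stated objective: faster
-- what changed: A re-runs a subset test (a linear scan of the goods list per item) for every (user, itemset) pair; B builds an inverted index item -> owning user positions once, computes each itemset's owners by intersecting hashed owner sets, and replays the (user, itemset) events in sorted user-major order to rebuild the identical insertion-ordered dict.
import Mathlib
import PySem

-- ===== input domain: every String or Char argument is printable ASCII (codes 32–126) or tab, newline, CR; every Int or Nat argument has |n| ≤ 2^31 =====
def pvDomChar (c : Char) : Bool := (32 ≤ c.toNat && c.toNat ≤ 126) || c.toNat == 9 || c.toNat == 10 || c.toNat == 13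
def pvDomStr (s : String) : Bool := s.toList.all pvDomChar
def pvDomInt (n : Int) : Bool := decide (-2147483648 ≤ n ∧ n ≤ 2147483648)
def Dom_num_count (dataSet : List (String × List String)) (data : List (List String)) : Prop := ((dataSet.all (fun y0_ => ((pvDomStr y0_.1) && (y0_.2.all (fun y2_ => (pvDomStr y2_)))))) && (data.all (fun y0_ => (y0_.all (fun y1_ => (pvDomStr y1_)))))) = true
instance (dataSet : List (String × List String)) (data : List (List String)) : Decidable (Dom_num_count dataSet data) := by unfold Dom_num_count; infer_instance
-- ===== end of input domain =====

-- B replaces A's per-user subset scans by an inverted index (item -> owning user positions)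
-- plus a sort of (user, itemset) events; alternative algorithm, same return value.

-- ===== PORT A =====
def num_count (dataSet : List (String × List String)) (data : List (List String)) : List (String × Int) :=
  (dataSet.foldl (fun (data_list : PySem.Dict String Int) ug =>
      data.foldl (fun (data_list : PySem.Dict String Int) i =>
        -- set(list(i)).issubset(list(goods)): every element of the set of i occurs in goods
        if (PySem.Set.ofList i).all (fun x => ug.2.contains x) then
          let keys := PySem.Str.join "、" i
          let d' := data_list.setdefault keys 0          -- data_list.setdefault(keys, 0)
          d'.insert keys (d'.getD keys 0 + 1)            -- data_list[keys] += 1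
        else data_list) data_list)
    PySem.Dict.empty).items

-- ===== PORT B =====
def num_count_alt (dataSet : List (String × List String)) (data : List (List String)) : List (String × Int) :=
  let goodsLists := dataSet.map (fun ug => ug.2)
  let n : Int := (goodsLists.length : Int)
  -- index.setdefault(g, []).append(pos)  ==  index[g] = index.get(g, []) + [pos]
  let index := (PySem.List.enumerate goodsLists).foldl
    (fun (idx : PySem.Dict String (List Int)) pg =>
      pg.2.foldl (fun idx g => idx.modify g [] (fun l => l ++ [pg.1])) idx) PySem.Dict.empty
  let keys := data.map (fun i => PySem.Str.join "、" i)
  let events := (PySem.List.enumerate data).foldl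
    (fun (ev : List (Int × Int)) ji =>
      let matched := ji.2.foldl
        (fun m g => m.filter (fun u => (index.getD g []).contains u))
        (PySem.List.pyRange 0 n 1)
      ev ++ matched.map (fun u => (u, ji.1))) []
  -- events.sort(): Python tuples sort lexicographically
  let sortedEvents := PySem.List.sorted2 events Prod.fst Prod.snd
  (sortedEvents.foldl (fun (result : PySem.Dict String Int) uj =>
      let k := PySem.List.pyGetD keys uj.2 ""
      result.insert k (result.getD k 0 + 1)) PySem.Dict.empty).items

-- ===== PRECONDITION & SPEC =====
def Spec_num_count (dataSet : List (String × List String)) (data : List (List String)) (out : List (String × Int)) : Prop := out = num_count_alt dataSet data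
instance (dataSet : List (String × List String)) (data : List (List String)) (out : List (String × Int)) : Decidable (Spec_num_count dataSet data out) := by unfold Spec_num_count; infer_instance

-- ===== CLAIM (what is proved, stated in full; the proofs are below) =====
def Claim_equal_num_count : Prop := ∀ (dataSet : List (String × List String)) (data : List (List String)), Dom_num_count dataSet data → Spec_num_count dataSet data (num_count dataSet data)

-- ===== LEMMAS AND PROOFS =====

-- the shared vocabulary of the proof
def pvKey (i : List String) : String := PySem.Str.join "、" i
def pvCond (goods i : List String) : Bool := i.all (fun x => goods.contains x)
def pvInc (r : PySem.Dict String Int) (k : String) : PySem.Dict String Int :=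
  r.insert k (r.getD k 0 + 1)

-- A's guard equals pvCond (all over the dedup = all over the list)
lemma condA_eq (goods i : List String) :
    ((PySem.Set.ofList i).all (fun x => goods.contains x)) = pvCond goods i := by
  rw [Bool.eq_iff_iff]
  simp only [pvCond, List.all_eq_true]
  constructor
  · intro h x hx; exact h x ((PySem.Set.mem_ofList i x).mpr hx)
  · intro h x hx; exact h x ((PySem.Set.mem_ofList i x).mp hx)

-- A's setdefault-then-increment step is pvInc
lemma stepA_eq (d : PySem.Dict String Int) (k : String) :
    (d.setdefault k 0).insert k ((d.setdefault k 0).getD k 0 + 1) = pvInc d k := by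
  unfold pvInc
  by_cases h : d.contains k = true
  · rw [PySem.Dict.setdefault_of_contains d 0 h]
  · have h' : d.contains k = false := by simpa using h
    rw [PySem.Dict.setdefault_of_not_contains d 0 h',
        PySem.Dict.getD_insert_self, PySem.Dict.insert_insert_self,
        PySem.Dict.getD_of_not_contains d 0 h']

-- A = fold of pvInc over the u-major key sequence
lemma A_char (ds : List (String × List String)) (data : List (List String)) :
    num_count ds data =
      ((ds.flatMap (fun ug => (data.filter (pvCond ug.2)).map pvKey)).foldl pvInc
        PySem.Dict.empty).items := by
  unfold num_count
  rw [List.foldl_flatMap]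
  congr 1
  apply PySem.List.foldl_congr_mem
  intro dl ug _
  rw [List.foldl_map, List.foldl_filter]
  apply PySem.List.foldl_congr_mem
  intro d i _
  rw [condA_eq]
  by_cases h : pvCond ug.2 i
  · simp only [h, if_true]
    exact stepA_eq d (pvKey i)
  · simp [h]

-- a chain of filters is one filter with the conjunction of the tests
lemma foldl_filter_all {G U : Type} (gs : List G) (p : G → U → Bool) (m0 : List U) :
    gs.foldl (fun m g => m.filter (p g)) m0
      = m0.filter (fun u => gs.all (fun g => p g u)) := by
  induction gs generalizing m0 with
  | nil => simp
  | cons g gs ih =>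
    simp only [List.foldl_cons, ih, List.filter_filter, List.all_cons]
    apply List.filter_congr
    intro u _
    exact Bool.and_comm _ _

-- membership in the inverted index
lemma index_mem (gls : List (List String)) (g : String) (u : Int) :
    (u ∈ ((PySem.List.enumerate gls).foldl
        (fun (idx : PySem.Dict String (List Int)) pg =>
          pg.2.foldl (fun idx g' => idx.modify g' [] (fun l => l ++ [pg.1])) idx)
        PySem.Dict.empty).getD g [])
      ↔ ∃ k : Nat, ∃ h : k < gls.length, u = (k : Int) ∧ g ∈ gls[k] := by
  have h1 : ∀ (pg : Int × List String) (idx : PySem.Dict String (List Int)),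
      pg.2.foldl (fun idx g' => idx.modify g' [] (fun l => l ++ [pg.1])) idx
        = (pg.2.map (fun g' => (g', pg.1))).foldl
            (fun d p => d.modify p.1 [] (fun l => l ++ [p.2])) idx := by
    intro pg idx; rw [List.foldl_map]
  simp only [h1, ← List.foldl_flatMap]
  rw [PySem.Dict.getD_foldl_modify_append]
  simp only [PySem.Dict.getD_empty, List.nil_append, List.mem_map, List.mem_filter,
    List.mem_flatMap, PySem.List.mem_enumerate_iff]
  constructor
  · rintro ⟨⟨gg, pos⟩, ⟨⟨pg, ⟨k, hk, rfl⟩, hmem⟩, heq⟩, rfl⟩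
    simp only at hmem
    obtain ⟨g', hg', hpair⟩ := hmem
    simp only [Prod.mk.injEq] at hpair
    obtain ⟨rfl, rfl⟩ := hpair
    simp only [beq_iff_eq] at heq
    subst heq
    exact ⟨k, hk, by simp, hg'⟩
  · rintro ⟨k, hk, rfl, hg⟩
    refine ⟨(g, (k : Int)), ⟨⟨((k : Int) + 0, gls[k]), ⟨k, hk, by simp⟩, ?_⟩, by simp⟩, rfl⟩
    exact ⟨g, hg, by simp⟩

-- rows: the u-major event list (the order in which A first meets each (user, itemset) pair)
def pvRows (ds : List (String × List String)) (data : List (List String)) : List (Int × Int) :=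
  (PySem.List.enumerate (ds.map (fun ug => ug.2))).flatMap
    (fun pu => ((PySem.List.enumerate data).filter (fun ji => pvCond pu.2 ji.2)).map
      (fun ji => (pu.1, ji.1)))

-- a filtered flatMap written as a flatMap of singletons
lemma flatMap_if_singleton {α β γ : Type} (a : α) (B : List β) (q : α → β → Bool)
    (m : α → β → γ) :
    B.flatMap (fun b => if q a b then [m a b] else []) = (B.filter (q a)).map (m a) := by
  induction B with
  | nil => simp
  | cons b B ihb => by_cases h : q a b <;> simp [h, ihb]

-- transposing a doubly-indexed filtered flatMap is a permutation
lemma transpose_perm {α β γ : Type} (A : List α) (B : List β) (q : α → β → Bool)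
    (m : α → β → γ) :
    (B.flatMap (fun b => ((A.filter (fun a => q a b)).map (fun a => m a b)))).Perm
      (A.flatMap (fun a => (B.filter (q a)).map (m a))) := by
  induction A with
  | nil => simp
  | cons a A ih =>
    simp only [List.flatMap_cons, List.filter_cons]
    have hsplit : ∀ b : β, ((if q a b then a :: A.filter (fun a' => q a' b)
        else A.filter (fun a' => q a' b)).map (fun a' => m a' b))
        = (if q a b then [m a b] else []) ++ (A.filter (fun a' => q a' b)).map (fun a' => m a' b) := by
      intro b; by_cases h : q a b <;> simp [h]
    simp only [hsplit]
    refine ((List.flatMap_append_perm B _ _).symm).trans ?_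
    rw [flatMap_if_singleton]
    exact List.Perm.append (List.Perm.refl _) ih

-- pvRows is strictly increasing in the lexicographic order on (user, itemset index)
lemma rows_pairwise (ds : List (String × List String)) (data : List (List String)) :
    (pvRows ds data).Pairwise
      (fun x y => toLex (x.1, x.2) < toLex (y.1, y.2)) := by
  unfold pvRows
  rw [List.pairwise_flatMap]
  constructor
  · intro pu _
    apply List.Pairwise.map
    · intro ji ji' h
      exact Prod.Lex.toLex_lt_toLex.mpr (Or.inr ⟨rfl, h⟩)
    · exact List.Pairwise.filter _ (PySem.List.pairwise_lt_enumerate data 0)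
  · apply List.Pairwise.imp ?_ (PySem.List.pairwise_lt_enumerate (ds.map (fun ug => ug.2)) 0)
    intro pu pu' h x hx y hy
    simp only [List.mem_map] at hx hy
    obtain ⟨ji, _, rfl⟩ := hx
    obtain ⟨ji', _, rfl⟩ := hy
    exact Prod.Lex.toLex_lt_toLex.mpr (Or.inl h)

-- B's unsorted event list is a permutation of pvRows
lemma events_perm (ds : List (String × List String)) (data : List (List String)) :
    ((PySem.List.enumerate data).foldl
      (fun (ev : List (Int × Int)) ji =>
        ev ++ (ji.2.foldl
          (fun m g => m.filter (fun u =>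
            (((PySem.List.enumerate (ds.map (fun ug => ug.2))).foldl
              (fun (idx : PySem.Dict String (List Int)) pg =>
                pg.2.foldl (fun idx g' => idx.modify g' [] (fun l => l ++ [pg.1])) idx)
              PySem.Dict.empty).getD g []).contains u))
          (PySem.List.pyRange 0 ((ds.map (fun ug => ug.2)).length : Int) 1)).map
            (fun u => (u, ji.1))) []).Perm (pvRows ds data) := by
  rw [PySem.List.foldl_append_eq_flatMap, List.nil_append]
  have hblock : ∀ ji : Int × List String,
      ((ji.2.foldl
          (fun m g => m.filter (fun u =>
            (((PySem.List.enumerate (ds.map (fun ug => ug.2))).foldl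
              (fun (idx : PySem.Dict String (List Int)) pg =>
                pg.2.foldl (fun idx g' => idx.modify g' [] (fun l => l ++ [pg.1])) idx)
              PySem.Dict.empty).getD g []).contains u))
          (PySem.List.pyRange 0 ((ds.map (fun ug => ug.2)).length : Int) 1)).map
            (fun u => (u, ji.1)))
        = ((PySem.List.enumerate (ds.map (fun ug => ug.2))).filter
            (fun pu => pvCond pu.2 ji.2)).map (fun pu => (pu.1, ji.1)) := by
    intro ji
    set gls := ds.map (fun ug => ug.2) with hgls
    rw [foldl_filter_all]
    have hrange : PySem.List.pyRange 0 (gls.length : Int) 1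
        = (PySem.List.enumerate gls).map (fun x => x.1) := by
      rw [PySem.List.map_fst_enumerate]; norm_num
    rw [hrange, List.filter_map, List.map_map]
    have hfc : ∀ pu ∈ PySem.List.enumerate gls,
        ((fun u => ji.2.all (fun g =>
            (((PySem.List.enumerate gls).foldl
              (fun (idx : PySem.Dict String (List Int)) pg =>
                pg.2.foldl (fun idx g' => idx.modify g' [] (fun l => l ++ [pg.1])) idx)
              PySem.Dict.empty).getD g []).contains u)) ∘ (fun x => x.1)) pu
          = pvCond pu.2 ji.2 := by
      intro pu hpu
      rw [PySem.List.mem_enumerate_iff] at hpu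
      obtain ⟨k, hk, rfl⟩ := hpu
      simp only [Function.comp_apply, pvCond]
      rw [Bool.eq_iff_iff]
      simp only [List.all_eq_true]
      constructor
      · intro h g hg
        have := h g hg
        rw [List.contains_eq_mem, decide_eq_true_iff, index_mem] at this
        obtain ⟨k', hk', hkk, hgm⟩ := this
        have : k' = k := by omega
        subst this
        rw [List.contains_eq_mem, decide_eq_true_iff]
        exact hgm
      · intro h g hg
        have := h g hg
        rw [List.contains_eq_mem, decide_eq_true_iff] at this
        rw [List.contains_eq_mem, decide_eq_true_iff, index_mem]
        exact ⟨k, hk, by omega, this⟩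
    rw [List.filter_congr hfc]
    rfl
  have hfl : (PySem.List.enumerate data).flatMap
      (fun ji => ((ji.2.foldl
          (fun m g => m.filter (fun u =>
            (((PySem.List.enumerate (ds.map (fun ug => ug.2))).foldl
              (fun (idx : PySem.Dict String (List Int)) pg =>
                pg.2.foldl (fun idx g' => idx.modify g' [] (fun l => l ++ [pg.1])) idx)
              PySem.Dict.empty).getD g []).contains u))
          (PySem.List.pyRange 0 ((ds.map (fun ug => ug.2)).length : Int) 1)).map
            (fun u => (u, ji.1))))
      = (PySem.List.enumerate data).flatMap
        (fun ji => ((PySem.List.enumerate (ds.map (fun ug => ug.2))).filter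
            (fun pu => pvCond pu.2 ji.2)).map (fun pu => (pu.1, ji.1))) := by
    apply List.flatMap_congr
    intro ji _
    exact hblock ji
  rw [hfl]
  exact transpose_perm (PySem.List.enumerate (ds.map (fun ug => ug.2)))
    (PySem.List.enumerate data) (fun pu ji => pvCond pu.2 ji.2) (fun pu ji => (pu.1, ji.1))

-- Python's tuple sort is the sort by the lexicographic key
lemma sorted2_eq_sorted_lex (xs : List (Int × Int)) :
    PySem.List.sorted2 xs Prod.fst Prod.snd
      = PySem.List.sorted xs (fun e => toLex (e.1, e.2)) := by
  unfold PySem.List.sorted2 PySem.List.sorted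
  simp only [Bool.false_eq_true, if_false]
  congr 1
  funext acc x
  congr 1
  funext a b
  rcases lt_trichotomy a.1 b.1 with h | h | h
  · simp [Prod.Lex.toLex_lt_toLex, h]
  · simp [Prod.Lex.toLex_lt_toLex, h]
  · simp [Prod.Lex.toLex_lt_toLex, h, not_lt.mpr (le_of_lt h)]
    omega

-- the sorted event list, projected to keys, is the u-major key sequence
lemma rows_map_keys (ds : List (String × List String)) (data : List (List String)) :
    (pvRows ds data).map (fun uj : Int × Int =>
      PySem.List.pyGetD (data.map (fun i => PySem.Str.join "、" i)) uj.2 "")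
      = ds.flatMap (fun ug => (data.filter (pvCond ug.2)).map pvKey) := by
  unfold pvRows
  rw [List.map_flatMap]
  have hblock : ∀ pu : Int × List String,
      (((PySem.List.enumerate data).filter (fun ji => pvCond pu.2 ji.2)).map
          (fun ji => (pu.1, ji.1))).map (fun uj : Int × Int =>
            PySem.List.pyGetD (data.map (fun i => PySem.Str.join "、" i)) uj.2 "")
        = (data.filter (pvCond pu.2)).map pvKey := by
    intro pu
    rw [List.map_map]
    have hcg : ∀ ji ∈ (PySem.List.enumerate data).filter (fun ji => pvCond pu.2 ji.2),
        ((fun uj : Int × Int =>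
            PySem.List.pyGetD (data.map (fun i => PySem.Str.join "、" i)) uj.2 "") ∘
          (fun ji => (pu.1, ji.1))) ji = pvKey ji.2 := by
      intro ji hji
      have hmem : ji ∈ PySem.List.enumerate data := List.mem_of_mem_filter hji
      rw [PySem.List.mem_enumerate_iff] at hmem
      obtain ⟨k, hk, rfl⟩ := hmem
      simp only [Function.comp_apply, zero_add]
      rw [PySem.List.pyGetD_natCast,
        List.getD_eq_getElem _ _ (by simpa using hk), List.getElem_map]
      rfl
    rw [List.map_congr_left hcg]
    have hsnd : data.filter (pvCond pu.2)
        = ((PySem.List.enumerate data).map (fun x => x.2)).filter (pvCond pu.2) := by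
      rw [PySem.List.map_snd_enumerate]
    rw [hsnd, List.filter_map, List.map_map]
    rfl
  rw [List.flatMap_congr (fun pu _ => hblock pu)]
  have hout : (PySem.List.enumerate (ds.map (fun ug => ug.2))).flatMap
      (fun pu => (data.filter (pvCond pu.2)).map pvKey)
      = ((PySem.List.enumerate (ds.map (fun ug => ug.2))).map (fun x => x.2)).flatMap
        (fun goods => (data.filter (pvCond goods)).map pvKey) := by
    rw [List.flatMap_map]
  rw [hout, PySem.List.map_snd_enumerate, List.flatMap_map]

-- B = fold of pvInc over the same u-major key sequence
lemma B_char (ds : List (String × List String)) (data : List (List String)) :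
    num_count_alt ds data =
      ((ds.flatMap (fun ug => (data.filter (pvCond ug.2)).map pvKey)).foldl pvInc
        PySem.Dict.empty).items := by
  show ((PySem.List.sorted2 ((PySem.List.enumerate data).foldl
      (fun (ev : List (Int × Int)) ji =>
        ev ++ (ji.2.foldl
          (fun m g => m.filter (fun u =>
            (((PySem.List.enumerate (ds.map (fun ug => ug.2))).foldl
              (fun (idx : PySem.Dict String (List Int)) pg =>
                pg.2.foldl (fun idx g' => idx.modify g' [] (fun l => l ++ [pg.1])) idx)
              PySem.Dict.empty).getD g []).contains u))
          (PySem.List.pyRange 0 ((ds.map (fun ug => ug.2)).length : Int) 1)).map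
            (fun u => (u, ji.1))) []) Prod.fst Prod.snd).foldl
      (fun (result : PySem.Dict String Int) uj =>
        result.insert (PySem.List.pyGetD (data.map (fun i => PySem.Str.join "、" i)) uj.2 "")
          ((result.getD (PySem.List.pyGetD (data.map (fun i => PySem.Str.join "、" i)) uj.2 "") 0) + 1))
      PySem.Dict.empty).items = _
  rw [sorted2_eq_sorted_lex,
    PySem.List.sorted_eq_of_perm_of_pairwise_lt _ (pvRows ds data) _
      (events_perm ds data).symm (by simpa using rows_pairwise ds data)]
  congr 1
  rw [← rows_map_keys, List.foldl_map]
  rfl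

-- ===== VERDICT (by name: the statement is the Claim_ definition above) =====
theorem num_count_spec : Claim_equal_num_count := by
  intro ds data _
  show num_count ds data = num_count_alt ds data
  rw [A_char, B_char]
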